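-- pv_equiv track=rewrite | github.com/fikreanteneh/A2SV-Contests | #22.contest/A_Make_it_Beautiful.py | solution
-- ===== SOURCE A (Python) =====
-- def solution(num, n):
--     num.sort(reverse=True)
--     num[1], num[-1] = num[-1], num[1]
--
--     runSum = num[0]
--     for i in range(1, n):
--         if runSum == num[i]:
--             return False
--         runSum += num[i]
--     return True
-- ===== SOURCE B (Python) =====
-- def solution(num, n):
--     # Same in-place sort and swap as the original (mutates num identically).
--     num.sort(reverse=True)
--     num[1], num[-1] = num[-1], num[1]
--     # Different algorithm: precompute the total of the first n elements once,
--     # then scan BACKWARD maintaining a suffix sum; since prefix(i-1) = total - suffix(i),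
--     # the forward check "running sum == num[i]" becomes "suf + num[i] == total".
--     total = 0
--     for i in range(n):
--         total += num[i]
--     ok = True
--     suf = 0
--     i = n - 1
--     while i >= 1:
--         suf += num[i]
--         if suf + num[i] == total:
--             ok = False
--         i -= 1
--     return ok
-- ===== Notes on version B (the rewrite author's own statement) =====
-- stated objective: alternative
-- what changed: B replaces A's forward running-prefix-sum check (with early return) by a different algorithm: it precomputes the total of the first n elements once and then scans BACKWARD with a suffix-sum accumulator and a flag, using the identity prefix(i-1) = total - suffix(i); Pre_ excludes lists shorter than 2 and n > len(num), where A raises IndexError on most inputs but can return False first on an early prefix match.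
-- outside the precondition, e.g. on solution([0, 0, 0, 0, 0], 1000000): A returns False, B raises IndexError
import Mathlib
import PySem

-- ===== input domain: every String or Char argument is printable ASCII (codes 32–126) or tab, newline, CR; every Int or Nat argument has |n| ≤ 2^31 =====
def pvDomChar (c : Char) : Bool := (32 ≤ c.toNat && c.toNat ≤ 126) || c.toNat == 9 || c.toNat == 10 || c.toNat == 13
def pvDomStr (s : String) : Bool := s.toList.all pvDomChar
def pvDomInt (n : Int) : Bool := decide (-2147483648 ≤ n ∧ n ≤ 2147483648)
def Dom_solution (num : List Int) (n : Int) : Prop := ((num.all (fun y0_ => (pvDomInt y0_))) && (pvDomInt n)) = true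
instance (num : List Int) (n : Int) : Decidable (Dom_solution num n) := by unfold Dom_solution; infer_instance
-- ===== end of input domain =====

-- B keeps the sort+swap prologue but replaces the forward running-prefix-sum loop by a precomputed
-- total plus a BACKWARD suffix-sum scan; both Pythons mutate the argument (in-place sort + swap)
-- identically — the equivalence proved here is about the RETURN value.

-- ===== PORT A =====
-- the sort-descending + swap prologue, shared verbatim by both Pythons
def pvPrep (num : List Int) : List Int :=
  let s := PySem.List.sorted num (fun x => x) true
  let a := PySem.List.pyGetD s 1 0       -- num[1]
  let b := PySem.List.pyGetD s (-1) 0    -- num[-1]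
  PySem.List.pySetD (PySem.List.pySetD s 1 b) (-1) a

-- A's 'for i in range(1, n)' with the running sum and early return
def solLoopA (xs : List Int) (i n : Int) (runSum : Int) : Bool :=
  if _h : i < n then
    match PySem.List.pyGet? xs i with
    | none => false                       -- IndexError in the Python; unreachable under Pre_
    | some v => if runSum = v then false else solLoopA xs (i + 1) n (runSum + v)
  else true
termination_by (n - i).toNat
decreasing_by omega

def solution (num : List Int) (n : Int) : Bool :=
  solLoopA (pvPrep num) 1 n (PySem.List.pyGetD (pvPrep num) 0 0)

-- ===== PORT B =====
-- Source B's 'for i in range(n): total += num[i]'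
def sumLoopB (xs : List Int) (i n acc : Int) : Int :=
  if _h : i < n then sumLoopB xs (i + 1) n (acc + PySem.List.pyGetD xs i 0) else acc
termination_by (n - i).toNat
decreasing_by omega

-- Source B's backward while loop: suffix sum 'suf', flag 'ok', i counting down from n-1 to 1
def sufLoopB (xs : List Int) (total suf : Int) (ok : Bool) (i : Int) : Bool :=
  if _h : 1 ≤ i then
    let suf' := suf + PySem.List.pyGetD xs i 0
    sufLoopB xs total suf'
      (if suf' + PySem.List.pyGetD xs i 0 = total then false else ok) (i - 1)
  else ok
termination_by i.toNat
decreasing_by omega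

def solution_alt (num : List Int) (n : Int) : Bool :=
  let xs := pvPrep num
  sufLoopB xs (sumLoopB xs 0 n 0) 0 true (n - 1)

-- ===== PRECONDITION & SPEC =====
-- A raises IndexError when len(num) < 2 (the swap); for n > len(num) both loops index past the end
-- and usually raise IndexError (A may instead return False on an early prefix match — whether it does
-- re-simulates the algorithm, so Pre_ excludes all n > len(num)).
def Pre_solution (num : List Int) (n : Int) : Prop := 2 ≤ num.length ∧ n ≤ (num.length : Int)
instance (num : List Int) (n : Int) : Decidable (Pre_solution num n) := by unfold Pre_solution; infer_instance
def pvWitness_solution : List Int × Int := ([3, 1, 2], 3)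
def Spec_solution (num : List Int) (n : Int) (out : Bool) : Prop := out = solution_alt num n
instance (num : List Int) (n : Int) (out : Bool) : Decidable (Spec_solution num n out) := by unfold Spec_solution; infer_instance

-- ===== CLAIM (what is proved, stated in full; the proofs are below) =====
def Claim_equal_solution : Prop := ∀ (num : List Int) (n : Int), Dom_solution num n → Pre_solution num n → Spec_solution num n (solution num n)

-- ===== LEMMAS AND PROOFS =====

lemma pyGetD_in_range (xs : List Int) (i : Int) (h0 : 0 ≤ i) (h1 : i < (xs.length : Int)) :
    PySem.List.pyGetD xs i 0 = xs.getD i.toNat 0 := by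
  rw [PySem.List.pyGetD_eq_getElem xs 0 h0 h1, List.getD_eq_getElem xs 0 (by omega)]

-- A's loop returns true iff no prefix sum matches its element on [i, n)
lemma A_char (xs : List Int) (n : Int) (hn : n ≤ (xs.length : Int)) (k : Nat) :
    ∀ i : Int, 1 ≤ i → (n - i).toNat = k →
    (solLoopA xs i n ((xs.take i.toNat).sum) = true ↔
      ∀ j : Int, i ≤ j → j < n → (xs.take j.toNat).sum ≠ xs.getD j.toNat 0) := by
  induction k with
  | zero =>
    intro i hi hk
    have h : ¬ i < n := by omega
    rw [solLoopA]
    simp only [h, dif_neg, not_false_iff]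
    constructor
    · intro _ j hj1 hj2; omega
    · intro _; trivial
  | succ m ih =>
    intro i hi hk
    have hlt : i < n := by omega
    have hib : i < (xs.length : Int) := by omega
    have hxi : PySem.List.pyGet? xs i = some (xs[i.toNat]'(by omega)) :=
      PySem.List.pyGet?_eq_some_getElem xs (by omega) hib
    have hgd : xs.getD i.toNat 0 = xs[i.toNat]'(by omega) := List.getD_eq_getElem xs 0 (by omega)
    rw [solLoopA]
    simp only [hlt, dif_pos, hxi]
    by_cases hc : (xs.take i.toNat).sum = xs[i.toNat]'(by omega)
    · simp only [hc, if_pos]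
      constructor
      · intro h; exact absurd h (by simp)
      · intro h
        have hh := h i le_rfl hlt
        rw [hgd] at hh
        exact absurd hc hh
    · rw [if_neg hc]
      have hsum : (xs.take i.toNat).sum + xs[i.toNat]'(by omega) = (xs.take (i + 1).toNat).sum := by
        have hnat : (i + 1).toNat = i.toNat + 1 := by omega
        rw [hnat, List.sum_take_succ xs i.toNat (by omega)]
      rw [hsum, ih (i + 1) (by omega) (by omega)]
      constructor
      · intro h j hj1 hj2
        by_cases hji : j = i
        · subst hji; rw [hgd]; exact hc
        · exact h j (by omega) hj2
      · intro h j hj1 hj2; exact h j (by omega) hj2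

-- the total loop computes the sum of the first n elements
lemma sumLoopB_eq (xs : List Int) (n : Int) (hn : n ≤ (xs.length : Int)) (k : Nat) :
    ∀ i acc : Int, 0 ≤ i → i ≤ n → (n - i).toNat = k →
    sumLoopB xs i n acc = acc + ((xs.take n.toNat).sum - (xs.take i.toNat).sum) := by
  induction k with
  | zero =>
    intro i acc h0 h1 hk
    have hin : i = n := by omega
    rw [sumLoopB]
    simp [hin]
  | succ m ih =>
    intro i acc h0 h1 hk
    have hlt : i < n := by omega
    rw [sumLoopB]
    simp only [hlt, dif_pos]
    rw [ih (i + 1) _ (by omega) (by omega) (by omega),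
        pyGetD_in_range xs i h0 (by omega)]
    have hsum : (xs.take i.toNat).sum + xs.getD i.toNat 0 = (xs.take (i + 1).toNat).sum := by
      have hnat : (i + 1).toNat = i.toNat + 1 := by omega
      rw [hnat, List.sum_take_succ xs i.toNat (by omega), List.getD_eq_getElem xs 0 (by omega)]
    omega

lemma totalB_eq (xs : List Int) (n : Int) (hn : n ≤ (xs.length : Int)) :
    sumLoopB xs 0 n 0 = (xs.take n.toNat).sum := by
  by_cases h0 : 0 ≤ n
  · rw [sumLoopB_eq xs n hn (n - 0).toNat 0 0 le_rfl h0 rfl]; simp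
  · have hneg : ¬ (0:Int) < n := by omega
    have hz : n.toNat = 0 := by omega
    rw [sumLoopB]
    simp [hneg, hz]

-- B's backward loop: the flag ANDed with "no match on [1, i]"
lemma B_char (xs : List Int) (n : Int) (hn : n ≤ (xs.length : Int)) (k : Nat) :
    ∀ (i : Int) (ok : Bool), i ≤ n - 1 → i.toNat = k →
    (sufLoopB xs ((xs.take n.toNat).sum)
        ((xs.take n.toNat).sum - (xs.take (i + 1).toNat).sum) ok i = true ↔
      ok = true ∧ ∀ j : Int, 1 ≤ j → j ≤ i → (xs.take j.toNat).sum ≠ xs.getD j.toNat 0) := by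
  induction k with
  | zero =>
    intro i ok hi hk
    have h : ¬ (1:Int) ≤ i := by omega
    rw [sufLoopB]
    simp only [h, dif_neg, not_false_iff]
    constructor
    · intro hok; exact ⟨hok, fun j hj1 hj2 => by exfalso; omega⟩
    · intro h'; exact h'.1
  | succ m ih =>
    intro i ok hi hk
    have h1 : (1:Int) ≤ i := by omega
    have hib : i < (xs.length : Int) := by omega
    have hgd : PySem.List.pyGetD xs i 0 = xs.getD i.toNat 0 :=
      pyGetD_in_range xs i (by omega) hib
    have hsum : (xs.take i.toNat).sum + xs.getD i.toNat 0 = (xs.take (i + 1).toNat).sum := by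
      have hnat : (i + 1).toNat = i.toNat + 1 := by omega
      rw [hnat, List.sum_take_succ xs i.toNat (by omega), List.getD_eq_getElem xs 0 (by omega)]
    rw [sufLoopB]
    simp only [h1, dif_pos, hgd]
    have hsuf : (xs.take n.toNat).sum - (xs.take (i + 1).toNat).sum + xs.getD i.toNat 0
        = (xs.take n.toNat).sum - (xs.take i.toNat).sum := by omega
    rw [hsuf]
    have hrw : (xs.take n.toNat).sum - (xs.take i.toNat).sum
        = (xs.take n.toNat).sum - (xs.take ((i - 1) + 1).toNat).sum := by
      have hi1 : (i - 1) + 1 = i := by omega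
      rw [hi1]
    by_cases hc : (xs.take i.toNat).sum = xs.getD i.toNat 0
    · have hcond : (xs.take n.toNat).sum - (xs.take i.toNat).sum + xs.getD i.toNat 0
          = (xs.take n.toNat).sum := by omega
      rw [if_pos hcond, hrw, ih (i - 1) false (by omega) (by omega)]
      constructor
      · intro h'; exact absurd h'.1 (by simp)
      · intro h'; exact absurd hc (h'.2 i h1 le_rfl)
    · have hcond : ¬ ((xs.take n.toNat).sum - (xs.take i.toNat).sum + xs.getD i.toNat 0
          = (xs.take n.toNat).sum) := by omega
      rw [if_neg hcond, hrw, ih (i - 1) ok (by omega) (by omega)]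
      constructor
      · intro h'
        refine ⟨h'.1, fun j hj1 hj2 => ?_⟩
        by_cases hji : j = i
        · subst hji; exact hc
        · exact h'.2 j hj1 (by omega)
      · intro h'; exact ⟨h'.1, fun j hj1 hj2 => h'.2 j hj1 (by omega)⟩

lemma take_one_sum (xs : List Int) (h : 0 < xs.length) :
    (xs.take (1 : Int).toNat).sum = xs.getD 0 0 := by
  cases xs with
  | nil => simp at h
  | cons x rest => simp

lemma length_pvPrep (num : List Int) : (pvPrep num).length = num.length := by
  simp [pvPrep, PySem.List.length_pySetD, PySem.List.length_sorted]

lemma main_eq (xs : List Int) (n : Int) (hL : 0 < xs.length) (hn : n ≤ (xs.length : Int)) :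
    solLoopA xs 1 n (PySem.List.pyGetD xs 0 0)
      = sufLoopB xs (sumLoopB xs 0 n 0) 0 true (n - 1) := by
  have h0 : PySem.List.pyGetD xs 0 0 = (xs.take (1 : Int).toNat).sum := by
    rw [PySem.List.pyGetD_zero, take_one_sum _ hL]
  have hsuf0 : (0 : Int) = (xs.take n.toNat).sum - (xs.take ((n - 1) + 1).toNat).sum := by
    have : (n - 1) + 1 = n := by omega
    rw [this]; omega
  rw [h0, totalB_eq xs n hn, hsuf0, Bool.eq_iff_iff,
      A_char xs n hn (n - 1).toNat 1 le_rfl rfl,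
      B_char xs n hn (n - 1).toNat (n - 1) true (by omega) rfl]
  constructor
  · intro h
    exact ⟨rfl, fun j hj1 hj2 => h j hj1 (by omega)⟩
  · intro h j hj1 hj2
    exact h.2 j hj1 (by omega)

-- ===== VERDICT (by name: the statement is the Claim_ definition above) =====
theorem solution_spec : Claim_equal_solution := by
  intro num n _ hpre
  obtain ⟨h2, hn⟩ := hpre
  have hlen : (pvPrep num).length = num.length := length_pvPrep num
  show solution num n = solution_alt num n
  exact main_eq (pvPrep num) n (by omega) (by omega)
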